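-- pv_equiv track=rewrite | github.com/alexandraback/datacollection | solutions_5634697451274240_0/Python/Yaksha/Pancakes.py | numFlips
-- ===== SOURCE A (Python) =====
-- def numFlips(stack, inverse=False):
--     happy = '-' if inverse else '+'
--
--     # base case
--     if not stack:
--         return 0
--
--     (stack, lastChar) = (stack[:-1], stack[-1])
--     if lastChar == happy:
--         return numFlips(stack)
--     else:
--         return numFlips(stack, inverse=(not inverse)) + 1
-- ===== SOURCE B (Python) =====
-- def numFlips(stack, inverse=False):
--     # One linear pass over the reversed string (no slicing), consuming
--     # chars in chunks: at a non-inverted state a '+' is skipped; the first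
--     # unhappy char costs one flip and the char right after it is checked
--     # against '-' (the state after a flip-then-settle is always non-inverted).
--     r = stack[::-1]
--     n = len(r)
--     count = 0
--     i = 0
--     if inverse and n > 0:
--         count += r[0] != '-'
--         i = 1
--     while i < n:
--         if r[i] == '+':
--             i += 1
--             continue
--         count += 1
--         if i + 1 < n:
--             count += r[i + 1] != '-'
--         i += 2
--     return count
-- ===== Notes on version B (the rewrite author's own statement) =====
-- stated objective: faster
-- what changed: Replaces the O(n^2) recursion with per-call string slicing by one linear pass over the reversed string that consumes characters in chunks (skip '+' runs, then count a flip and check the very next character), using the invariant that the state right after a flip is always non-inverted.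
import Mathlib
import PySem

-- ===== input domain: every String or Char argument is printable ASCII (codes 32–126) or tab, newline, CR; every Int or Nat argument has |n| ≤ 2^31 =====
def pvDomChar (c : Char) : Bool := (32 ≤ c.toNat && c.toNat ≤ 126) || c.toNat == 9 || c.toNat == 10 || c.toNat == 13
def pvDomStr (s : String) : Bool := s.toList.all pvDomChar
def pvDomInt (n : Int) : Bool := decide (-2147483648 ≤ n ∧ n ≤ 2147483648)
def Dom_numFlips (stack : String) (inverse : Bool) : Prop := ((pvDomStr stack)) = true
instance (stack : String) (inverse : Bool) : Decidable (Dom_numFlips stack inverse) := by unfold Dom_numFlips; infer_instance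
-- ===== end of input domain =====

-- B replaces A's O(n^2) slicing recursion by one linear chunked pass over the reversed string.

-- ===== PORT A =====
-- literal port of A's recursion: peel the LAST char (stack[:-1], stack[-1]),
-- recurse with inverse reset to False on a happy char, toggled (+1) otherwise
def numFlipsRec : List Char → Bool → Int
  | [], _ => 0
  | c :: cs, inverse =>
    let happy : Char := if inverse then '-' else '+'
    let stack' := (c :: cs).dropLast
    let lastChar := (c :: cs).getLast (by simp)
    if lastChar = happy then numFlipsRec stack' false
    else numFlipsRec stack' (!inverse) + 1
termination_by l _ => l.length
decreasing_by all_goals simp [List.length_dropLast]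

def numFlips (stack : String) (inverse : Bool) : Int :=
  numFlipsRec stack.toList inverse

-- ===== PORT B =====
-- the while loop of Source B over the reversed characters, as structural recursion:
-- skip '+', otherwise count 1 and also inspect the following char against '-'
def loopB : List Char → Int
  | [] => 0
  | c :: rest =>
    if c = '+' then loopB rest
    else
      match rest with
      | [] => 1
      | d :: rest' => 1 + (if d ≠ '-' then 1 else 0) + loopB rest'

def numFlips_alt (stack : String) (inverse : Bool) : Int :=
  let r := stack.toList.reverse
  match inverse, r with
  | true, c :: rest => (if c ≠ '-' then 1 else 0) + loopB rest
  | true, [] => 0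
  | false, l => loopB l

-- ===== PRECONDITION & SPEC =====
def Spec_numFlips (stack : String) (inverse : Bool) (out : Int) : Prop := out = numFlips_alt stack inverse
instance (stack : String) (inverse : Bool) (out : Int) : Decidable (Spec_numFlips stack inverse out) := by unfold Spec_numFlips; infer_instance

-- ===== CLAIM (what is proved, stated in full; the proofs are below) =====
def Claim_equal_numFlips : Prop := ∀ (stack : String) (inverse : Bool), Dom_numFlips stack inverse → Spec_numFlips stack inverse (numFlips stack inverse)

-- ===== LEMMAS AND PROOFS =====

-- simple state machine over the REVERSED char list, equal to A's recursion:
-- count a mismatch against the current happy char; next state is ¬inv if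
-- mismatched, False if matched (both equal !inv && c ≠ '+')
def sm : List Char → Bool → Int
  | [], _ => 0
  | c :: r, inv =>
    (if c = (if inv then '-' else '+') then 0 else 1) + sm r (!inv && c ≠ '+')

lemma numFlipsRec_append (cs : List Char) (x : Char) (inv : Bool) :
    numFlipsRec (cs ++ [x]) inv =
      (if x = (if inv then '-' else '+') then 0 else 1) + numFlipsRec cs (!inv && x ≠ '+') := by
  rcases hcs : cs ++ [x] with _ | ⟨c, cs'⟩
  · simp at hcs
  · rw [numFlipsRec]
    simp only [← hcs, List.dropLast_concat, List.getLast_concat]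
    by_cases hx : x = (if inv then '-' else '+')
    · cases inv <;> simp_all
    · cases inv <;> simp_all <;> omega

lemma numFlipsRec_eq_sm (r : List Char) (inv : Bool) :
    numFlipsRec r.reverse inv = sm r inv := by
  induction r generalizing inv with
  | nil => rw [List.reverse_nil, numFlipsRec]; rfl
  | cons c r ih =>
    rw [List.reverse_cons, numFlipsRec_append, sm, ih]

lemma sm_false_eq_loopB (r : List Char) : sm r false = loopB r := by
  induction r using loopB.induct with
  | case1 => rfl
  | case2 rest ih => rw [loopB.eq_def]; simp [sm, ih]
  | case3 d h => simp [sm, loopB, h]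
  | case4 c h d rest' ih =>
    simp [sm, loopB, h, ih]
    by_cases hd : d = '-' <;> simp [hd] <;> try omega

theorem numFlips_eq_alt (stack : String) (inverse : Bool) :
    numFlips stack inverse = numFlips_alt stack inverse := by
  have h := numFlipsRec_eq_sm (stack.toList.reverse) inverse
  rw [List.reverse_reverse] at h
  unfold numFlips numFlips_alt
  rw [h]
  cases inverse with
  | false => exact sm_false_eq_loopB _
  | true =>
    cases hr : stack.toList.reverse with
    | nil => rfl
    | cons c rest =>
      by_cases hc : c = '-' <;> simp [sm, sm_false_eq_loopB, hc]

-- ===== VERDICT (by name: the statement is the Claim_ definition above) =====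
theorem numFlips_spec : Claim_equal_numFlips := by
  intro stack inverse _
  exact numFlips_eq_alt stack inverse
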